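-- pv_equiv track=rewrite | github.com/eleftheriabella96/master-thesis | all_homore_copy.py | complexity_count_fast
-- ===== SOURCE A (Python) =====
-- def bubble_count(x):
--     """
--     counts the number of swaps when sorting
--     :param x: the input vector
--     :return: the total number of swaps
--     """
--     y = 0
--     for i in range(len(x) - 1, 0, -1):
--             for j in range(i):
--                     if x[j] > x[j + 1]:
--                             x[j], x[j + 1] = x[j + 1], x[j]
--                             y += 1
--     return y
--
-- def complexity_count_fast(x, m):
--     """
--     :param x: the input series
--     :param m: the dimension of the space
--     :return: the series of complexities for total number of swaps
--     """
--
--     if len(x) < m: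
--             return []
--
--     y = [bubble_count(x[:m])]
--     v = sorted(x[:m])
--
--     for i in range(m,len(x)):
--             steps = y[i-m]
--             steps -= v.index(x[i-m])
--             v.pop(v.index(x[i-m]))
--             v.append(x[i])
--             j = m-1
--             while j > 0 and v[j] < v[j-1]:
--                     v[j], v[j-1] = v[j-1], v[j]
--                     steps += 1
--                     j -= 1
--             y.append(steps)
--
--     return y
-- ===== SOURCE B (Python) =====
-- def complexity_count_fast(x, m):
--     if len(x) < m:
--         return []
--     out = []
--     for k in range(len(x) - m + 1):
--         w = x[k:k + m]
--         c = 0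
--         while w:
--             h = w[0]
--             w = w[1:]
--             c += sum(h > e for e in w)
--         out.append(c)
--     return out
-- ===== Notes on version B (the rewrite author's own statement) =====
-- stated objective: simpler
-- what changed: B counts each window's inversion pairs directly (a recursive head-vs-tail pair count per window slice) instead of A's incremental scheme that maintains a sorted copy of the window with index/pop and a bubble-back insertion loop; Pre_ restricts to the natural domain m >= 1 plus the degenerate empty-series point with m = 0 (where both return the same value); on every other input with m <= 0 A raises ValueError/IndexError.
import Mathlib
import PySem

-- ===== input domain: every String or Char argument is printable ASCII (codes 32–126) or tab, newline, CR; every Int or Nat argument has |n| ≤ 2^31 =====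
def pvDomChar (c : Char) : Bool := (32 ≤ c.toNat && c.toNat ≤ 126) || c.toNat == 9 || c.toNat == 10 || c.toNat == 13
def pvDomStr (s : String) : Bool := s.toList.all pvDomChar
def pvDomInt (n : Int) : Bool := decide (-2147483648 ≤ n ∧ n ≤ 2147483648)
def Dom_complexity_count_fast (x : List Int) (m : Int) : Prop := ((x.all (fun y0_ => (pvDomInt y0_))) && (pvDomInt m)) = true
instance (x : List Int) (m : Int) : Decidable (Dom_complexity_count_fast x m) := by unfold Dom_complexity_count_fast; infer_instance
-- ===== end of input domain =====

-- B replaces A's incremental sliding update (sorted window copy, index/pop, bubble-back insertion)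
-- by a direct per-window inversion-pair count: simpler, same values on the stated domain.

-- ===== PORT A =====
-- inner 'for j in range(i)' body of bubble_count; pyGetD/pySetD defaults are unreachable (j, j+1 in range)
def bubbleInner (st : List Int × Int) (i : Int) : List Int × Int :=
  (PySem.List.pyRange 0 i 1).foldl (fun st j =>
    if PySem.List.pyGetD st.1 j 0 > PySem.List.pyGetD st.1 (j + 1) 0 then
      (PySem.List.pySetD (PySem.List.pySetD st.1 j (PySem.List.pyGetD st.1 (j + 1) 0)) (j + 1)
        (PySem.List.pyGetD st.1 j 0), st.2 + 1)
    else st) st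

def bubble_count (x : List Int) : Int :=
  ((PySem.List.pyRange (PySem.List.len x - 1) 0 (-1)).foldl bubbleInner (x, 0)).2

-- 'while j > 0 and v[j] < v[j-1]': j ported as the Nat counter (Python's j = m-1 start is (m-1).toNat:
-- identical behaviour, since for m ≤ 0 the Python loop condition j > 0 is false at once)
def bubbleWhile : List Int → Int → Nat → List Int × Int
  | v, steps, 0 => (v, steps)
  | v, steps, j + 1 =>
    if PySem.List.pyGetD v ((j : Int) + 1) 0 < PySem.List.pyGetD v (j : Int) 0 then
      bubbleWhile (PySem.List.pySetD (PySem.List.pySetD v ((j : Int) + 1) (PySem.List.pyGetD v (j : Int) 0))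
        (j : Int) (PySem.List.pyGetD v ((j : Int) + 1) 0)) (steps + 1) j
    else (v, steps)

-- one iteration of A's main loop; '.getD 0' on index? is unreachable under Pre_ (x[i-m] is in the window)
def ccfStep (x : List Int) (m : Int) (st : List Int × List Int) (i : Int) : List Int × List Int :=
  let steps0 := PySem.List.pyGetD st.1 (i - m) 0
  let xv := PySem.List.pyGetD x (i - m) 0
  let idx := (PySem.List.index? st.2 xv).getD 0
  let v1 := st.2.eraseIdx ((PySem.List.index? st.2 xv).getD 0)
  let v2 := v1 ++ [PySem.List.pyGetD x i 0]
  let r := bubbleWhile v2 (steps0 - (idx : Int)) (m - 1).toNat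
  (st.1 ++ [r.2], r.1)

def complexity_count_fast (x : List Int) (m : Int) : List Int :=
  if PySem.List.len x < m then []
  else
    ((PySem.List.pyRange m (PySem.List.len x) 1).foldl (ccfStep x m)
      ([bubble_count (PySem.List.slice x none (some m))],
       PySem.List.sorted (PySem.List.slice x none (some m)) (fun e => e) false)).1

-- ===== PORT B =====
-- the per-window 'while w:' pair-counting loop of Source B (w shrinks by one each turn)
def invLoop : List Int → Int → Int
  | [], c => c
  | h :: t, c => invLoop t (c + (t.map (fun e => if h > e then (1 : Int) else 0)).sum)

def complexity_count_fast_alt (x : List Int) (m : Int) : List Int :=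
  if PySem.List.len x < m then []
  else (PySem.List.pyRange 0 (PySem.List.len x - m + 1) 1).foldl
    (fun out k => out ++ [invLoop (PySem.List.slice x (some k) (some (k + m))) 0]) []

-- ===== PRECONDITION & SPEC =====
-- Pre_ restricts to the natural domain m ≥ 1, plus the degenerate empty-series point with m = 0
-- (where both programs return the same value); on every other input with m ≤ 0 the Python A
-- raises (ValueError or IndexError).
def Pre_complexity_count_fast (x : List Int) (m : Int) : Prop := 1 ≤ m ∨ (x = [] ∧ m = 0)
instance (x : List Int) (m : Int) : Decidable (Pre_complexity_count_fast x m) := by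
  unfold Pre_complexity_count_fast; infer_instance

def pvWitness_complexity_count_fast : List Int × Int := ([2, 1, 3], 2)

def Spec_complexity_count_fast (x : List Int) (m : Int) (out : List Int) : Prop :=
  out = complexity_count_fast_alt x m
instance (x : List Int) (m : Int) (out : List Int) : Decidable (Spec_complexity_count_fast x m out) := by
  unfold Spec_complexity_count_fast; infer_instance

-- ===== CLAIM (what is proved, stated in full; the proofs are below) =====
def Claim_equal_complexity_count_fast : Prop := ∀ (x : List Int) (m : Int),
  Dom_complexity_count_fast x m → Pre_complexity_count_fast x m →
  Spec_complexity_count_fast x m (complexity_count_fast x m)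

-- ===== LEMMAS AND PROOFS =====

-- proof-side inversion count and its relation to the accumulator loop invLoop
def invAux : List Int → Int
  | [] => 0
  | h :: t => (t.map (fun e => if h > e then (1 : Int) else 0)).sum + invAux t

theorem invLoop_eq (w : List Int) : ∀ c : Int, invLoop w c = c + invAux w := by
  induction w with
  | nil => intro c; simp [invLoop, invAux]
  | cons h t ih =>
    intro c
    rw [invLoop, ih, invAux]
    ring

-- count of elements of t smaller than a / greater than z (as Int)
def cntLT (a : Int) (t : List Int) : Int := (t.countP (fun e => decide (e < a)) : Int)
def cntGT (z : Int) (t : List Int) : Int := (t.countP (fun e => decide (z < e)) : Int)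

theorem invAux_cons (h : Int) (t : List Int) : invAux (h :: t) = cntLT h t + invAux t := by
  simp only [invAux, cntLT]
  rw [show (fun e => if h > e then (1:Int) else 0) = (fun e => if (fun e => decide (e < h)) e = true then (1:Int) else 0) by funext e; simp [gt_iff_lt]]
  rw [PySem.List.sum_map_ite_one_zero]

theorem invAux_append_singleton (t : List Int) (z : Int) :
    invAux (t ++ [z]) = invAux t + cntGT z t := by
  induction t with
  | nil => simp [invAux, cntGT]
  | cons a t ih =>
    simp only [List.cons_append, invAux, ih, List.map_append, List.sum_append, cntGT,
      List.countP_cons, List.map_cons, List.map_nil, List.sum_cons, List.sum_nil]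
    push_cast
    split_ifs <;> simp_all <;> omega

-- ---- structural bubble pass (proof-side model of bubbleInner) ----
def bpass : List Int → List Int × Int
  | [] => ([], 0)
  | [a] => ([a], 0)
  | a :: b :: t =>
    if b < a then ((bpass (a :: t)).1.cons b, (bpass (a :: t)).2 + 1)
    else ((bpass (b :: t)).1.cons a, (bpass (b :: t)).2)
  termination_by l => l.length

theorem bpass_length (l : List Int) : (bpass l).1.length = l.length := by
  fun_induction bpass l with
  | case1 => rfl
  | case2 a => rfl
  | case3 a b t h ih => simp [ih]
  | case4 a b t h ih => simp [ih]

theorem bpass_ne_nil (a : Int) (t : List Int) : (bpass (a :: t)).1 ≠ [] := by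
  have := bpass_length (a :: t)
  intro hc; rw [hc] at this; simp at this

theorem getLastD_cons_ne (a d : Int) (l : List Int) (h : l ≠ []) :
    (a :: l).getLastD d = l.getLastD 0 := by
  cases l with
  | nil => simp at h
  | cons c t => rw [List.getLastD_cons, List.getLastD_cons, List.getLastD_cons]

theorem bpass_perm (l : List Int) : (bpass l).1.Perm l := by
  fun_induction bpass l with
  | case1 => rfl
  | case2 a => rfl
  | case3 a b t h ih =>
    simp only [bpass, if_pos h, List.cons]
    exact (ih.cons b).trans (List.Perm.swap a b t)
  | case4 a b t h ih =>
    simp only [bpass, if_neg h, List.cons]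
    exact ih.cons a

theorem bpass_inv (l : List Int) : invAux (bpass l).1 + (bpass l).2 = invAux l := by
  fun_induction bpass l with
  | case1 => rfl
  | case2 a => rfl
  | case3 a b t h ih =>
    have hc : cntLT b (bpass (a :: t)).1 = cntLT b (a :: t) := by
      unfold cntLT; rw [(bpass_perm (a :: t)).countP_eq]
    have i1 := invAux_cons b (bpass (a :: t)).1
    have i2 := invAux_cons a (b :: t)
    have i3 := invAux_cons b t
    have i4 := invAux_cons a t
    have c1 : cntLT b (a :: t) = cntLT b t := by
      unfold cntLT
      simp [List.countP_cons, show ¬ (a < b) by omega]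
    have c2 : cntLT a (b :: t) = cntLT a t + 1 := by
      unfold cntLT
      simp [List.countP_cons, h]
    show invAux (b :: (bpass (a :: t)).1) + ((bpass (a :: t)).2 + 1) = invAux (a :: b :: t)
    linarith [i1, i2, i3, i4, ih, hc, c1, c2]
  | case4 a b t h ih =>
    have hc : cntLT a (bpass (b :: t)).1 = cntLT a (b :: t) := by
      unfold cntLT; rw [(bpass_perm (b :: t)).countP_eq]
    have i1 := invAux_cons a (bpass (b :: t)).1
    have i2 := invAux_cons a (b :: t)
    show invAux (a :: (bpass (b :: t)).1) + (bpass (b :: t)).2 = invAux (a :: b :: t)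
    linarith [i1, i2, ih, hc]

theorem bpass_last_ge (l : List Int) :
    ∀ e ∈ l, e ≤ (bpass l).1.getLastD 0 := by
  fun_induction bpass l with
  | case1 => intro e he; simp at he
  | case2 a => intro e he; simp at he; simp [he]
  | case3 a b t h ih =>
    intro e he
    show e ≤ (b :: (bpass (a :: t)).1).getLastD 0
    rw [getLastD_cons_ne _ _ _ (bpass_ne_nil a t)]
    rcases List.mem_cons.mp he with rfl | he2
    · exact ih _ (by simp)
    · rcases List.mem_cons.mp he2 with rfl | he3
      · exact le_of_lt (lt_of_lt_of_le h (ih a (by simp)))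
      · exact ih e (by simp [he3])
  | case4 a b t h ih =>
    intro e he
    show e ≤ (a :: (bpass (b :: t)).1).getLastD 0
    rw [getLastD_cons_ne _ _ _ (bpass_ne_nil b t)]
    rcases List.mem_cons.mp he with rfl | he2
    · exact le_trans (not_lt.mp h) (ih b (by simp))
    · exact ih e he2

theorem bpass_append_singleton (p : List Int) (z : Int) (hp : p ≠ []) :
    bpass (p ++ [z]) =
      (if z < (bpass p).1.getLastD 0
        then ((bpass p).1.dropLast ++ [z, (bpass p).1.getLastD 0], (bpass p).2 + 1)
        else ((bpass p).1 ++ [z], (bpass p).2)) := by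
  fun_induction bpass p with
  | case1 => simp at hp
  | case2 a =>
    show bpass [a, z] = _
    by_cases h : z < a <;> simp [bpass, h]
  | case3 a b t h ih =>
    have hne := bpass_ne_nil a t
    show bpass (a :: b :: (t ++ [z])) = _
    have e1 : bpass (a :: b :: (t ++ [z])) =
        ((bpass ((a :: t) ++ [z])).1.cons b, (bpass ((a :: t) ++ [z])).2 + 1) := by
      simp only [bpass, if_pos h, List.cons_append]
    rw [e1, ih (by simp), getLastD_cons_ne _ _ _ hne, List.dropLast_cons_of_ne_nil hne]
    split_ifs with hz <;> simp
  | case4 a b t h ih =>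
    have hne := bpass_ne_nil b t
    show bpass (a :: b :: (t ++ [z])) = _
    have e1 : bpass (a :: b :: (t ++ [z])) =
        ((bpass ((b :: t) ++ [z])).1.cons a, (bpass ((b :: t) ++ [z])).2) := by
      simp only [bpass, if_neg h, List.cons_append]
    rw [e1, ih (by simp), getLastD_cons_ne _ _ _ hne, List.dropLast_cons_of_ne_nil hne]
    split_ifs with hz <;> simp

-- list surgery at an index, stated on an append decomposition
theorem getD_mid (u w : List Int) (b d : Int) : (u ++ b :: w).getD u.length d = b := by
  induction u with
  | nil => rfl
  | cons a t ih => simpa using ih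

theorem set_mid (u w : List Int) (b c : Int) : (u ++ b :: w).set u.length c = u ++ c :: w := by
  induction u with
  | nil => rfl
  | cons a t ih => simpa using ih

theorem getD_mid2 (u w : List Int) (b z d : Int) : (u ++ b :: z :: w).getD (u.length + 1) d = z := by
  have := getD_mid (u ++ [b]) w z d; simpa using this

theorem set_mid2 (u w : List Int) (b z c : Int) :
    (u ++ b :: z :: w).set (u.length + 1) c = u ++ b :: c :: w := by
  have := set_mid (u ++ [b]) w z c; simpa using this

theorem list_decomp_last (q : List Int) (h : q ≠ []) :
    q = q.dropLast ++ [q.getLastD 0] := by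
  conv_lhs => rw [← List.dropLast_append_getLast h]
  rw [List.getLastD_eq_getLast?, List.getLast?_eq_some_getLast h]
  rfl

-- inner index loop = structural pass on the prefix
theorem bubbleInner_eq_bpass (i : Nat) (xs : List Int) (y : Int) (hi : i < xs.length) :
    bubbleInner (xs, y) ((i : Int)) =
      ((bpass (xs.take (i + 1))).1 ++ xs.drop (i + 1), y + (bpass (xs.take (i + 1))).2) := by
  induction i generalizing y with
  | zero =>
    cases xs with
    | nil => simp at hi
    | cons x0 xs' =>
      show (PySem.List.pyRange 0 ((0 : Nat) : Int) 1).foldl _ _ = _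
      rw [PySem.List.pyRange_one_eq_nil (by simp)]
      simp [bpass]
  | succ i ih =>
    have hi' : i < xs.length := by omega
    have hi2 : i + 1 < xs.length := hi
    have hP1 : i + 1 ≤ xs.length := le_of_lt hi
    set P := xs.take (i + 1) with hPdef
    have hlenP : P.length = i + 1 := by simp [hPdef]; omega
    have hPne : P ≠ [] := by intro hc; rw [hc] at hlenP; simp at hlenP
    set q := (bpass P).1 with hqdef
    have hlenq : q.length = i + 1 := by rw [hqdef, bpass_length]; exact hlenP
    have hqne : q ≠ [] := by intro hc; rw [hc] at hlenq; simp at hlenq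
    set mx := q.getLastD 0 with hmxdef
    set q' := q.dropLast with hq'def
    have hq : q = q' ++ [mx] := list_decomp_last q hqne
    have hlq' : q'.length = i := by
      have := congrArg List.length hq
      simp at this; omega
    set b := xs[i + 1] with hbdef
    have hdrop : xs.drop (i + 1) = b :: xs.drop (i + 2) := List.drop_eq_getElem_cons hi2
    have htake : xs.take (i + 2) = P ++ [b] := by
      rw [hPdef, List.take_succ, List.getElem?_eq_getElem hi2]
      rfl
    have hr : PySem.List.pyRange 0 (((i + 1 : Nat)) : Int) 1 =
        PySem.List.pyRange 0 ((i : Nat)) 1 ++ [((i : Nat) : Int)] := by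
      push_cast
      exact PySem.List.pyRange_one_succ_right (by positivity)
    show (PySem.List.pyRange 0 (((i + 1 : Nat)) : Int) 1).foldl _ _ = _
    rw [hr, List.foldl_append]
    rw [show (PySem.List.pyRange 0 ((i : Nat)) 1).foldl _ (xs, y) = bubbleInner (xs, y) ((i : Nat)) from rfl]
    rw [ih y hi']
    have hL : q ++ xs.drop (i + 1) = q' ++ mx :: b :: xs.drop (i + 2) := by
      rw [hdrop, hq]; simp
    show (if PySem.List.pyGetD (q ++ xs.drop (i+1)) ((i : Nat)) 0 >
            PySem.List.pyGetD (q ++ xs.drop (i+1)) (((i : Nat)) + 1) 0 then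
          (PySem.List.pySetD (PySem.List.pySetD (q ++ xs.drop (i+1)) ((i : Nat))
              (PySem.List.pyGetD (q ++ xs.drop (i+1)) (((i : Nat)) + 1) 0)) (((i : Nat)) + 1)
              (PySem.List.pyGetD (q ++ xs.drop (i+1)) ((i : Nat)) 0), y + (bpass P).2 + 1)
        else (q ++ xs.drop (i+1), y + (bpass P).2)) = _
    have g0 : PySem.List.pyGetD (q ++ xs.drop (i+1)) ((i : Nat)) 0 = mx := by
      rw [hL, ← hlq', PySem.List.pyGetD_natCast, getD_mid]
    have g1 : PySem.List.pyGetD (q ++ xs.drop (i+1)) (((i : Nat)) + 1) 0 = b := by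
      rw [hL, show ((i : Nat) : Int) + 1 = ((i + 1 : Nat) : Int) by push_cast; ring,
        PySem.List.pyGetD_natCast, ← hlq', getD_mid2]
    rw [g0, g1]
    have hbp := bpass_append_singleton P b hPne
    rw [← hqdef, ← hmxdef, ← hq'def] at hbp
    by_cases hbm : b < mx
    · rw [if_pos (by omega)]
      have s1 : PySem.List.pySetD (q ++ xs.drop (i+1)) ((i : Nat)) b =
          q' ++ b :: b :: xs.drop (i + 2) := by
        rw [hL, ← hlq', PySem.List.pySetD_natCast, set_mid]
      have s2 : PySem.List.pySetD (q' ++ b :: b :: xs.drop (i + 2)) (((i : Nat)) + 1) mx =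
          q' ++ b :: mx :: xs.drop (i + 2) := by
        rw [show ((i : Nat) : Int) + 1 = ((i + 1 : Nat) : Int) by push_cast; ring,
          PySem.List.pySetD_natCast, ← hlq', set_mid2]
      rw [s1, s2, htake, hbp, if_pos hbm]
      simp
      ring
    · rw [if_neg (by omega), htake, hbp, if_neg hbm]
      rw [hdrop]
      simp

-- outer countdown loop of bubble_count
theorem bubble_outer (k : Nat) (xs : List Int) (y : Int) (hk : k < xs.length) :
    ∃ w, (PySem.List.pyRange (k : Int) 0 (-1)).foldl bubbleInner (xs, y) =
        (w ++ xs.drop (k + 1), y + invAux (xs.take (k + 1))) ∧ w.Perm (xs.take (k + 1)) := by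
  induction k generalizing xs y with
  | zero =>
    refine ⟨xs.take 1, ?_, List.Perm.refl _⟩
    rw [show ((0 : Nat) : Int) = (0 : Int) by simp, PySem.List.pyRange_neg_one_eq_nil (by omega)]
    cases xs with
    | nil => simp at hk
    | cons x0 xs' => simp [invAux, List.foldl_nil]
  | succ k ih =>
    have hk1 : k + 1 < xs.length := hk
    have hr : PySem.List.pyRange (((k + 1 : Nat)) : Int) 0 (-1) =
        (((k + 1 : Nat)) : Int) :: PySem.List.pyRange ((k : Nat)) 0 (-1) := by
      rw [PySem.List.pyRange_neg_one_cons (by positivity)]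
      norm_num
    rw [hr, List.foldl_cons, bubbleInner_eq_bpass (k + 1) xs y hk1]
    set Q := (bpass (xs.take (k + 2))).1 with hQdef
    set C := (bpass (xs.take (k + 2))).2 with hCdef
    have hlenQ : Q.length = k + 2 := by
      rw [hQdef, bpass_length, List.length_take]; omega
    have hQne : Q ≠ [] := by intro hc; rw [hc] at hlenQ; simp at hlenQ
    set mxQ := Q.getLastD 0 with hmxdef
    set Q' := Q.dropLast with hQ'def
    have hQ : Q = Q' ++ [mxQ] := list_decomp_last Q hQne
    have hlQ' : Q'.length = k + 1 := by
      have := congrArg List.length hQ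
      simp at this; omega
    have hxs' : Q ++ xs.drop (k + 2) = Q' ++ ([mxQ] ++ xs.drop (k + 2)) := by
      rw [hQ]; simp
    have hlen' : (Q ++ xs.drop (k + 2)).length = xs.length := by
      rw [List.length_append, hlenQ, List.length_drop]; omega
    obtain ⟨w, hw, hwp⟩ := ih (Q ++ xs.drop (k + 2)) (y + C) (by omega)
    have htk : (Q ++ xs.drop (k + 2)).take (k + 1) = Q' := by
      rw [hxs', List.take_left' hlQ']
    have hdk : (Q ++ xs.drop (k + 2)).drop (k + 1) = mxQ :: xs.drop (k + 2) := by
      rw [hxs', List.drop_left' hlQ']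
      rfl
    rw [htk, hdk] at hw
    rw [htk] at hwp
    refine ⟨w ++ [mxQ], ?_, ?_⟩
    · rw [hw]
      have hcnt : cntGT mxQ Q' = 0 := by
        unfold cntGT
        rw [List.countP_eq_zero.mpr]
        · rfl
        · intro e he
          have heQ : e ∈ Q := by rw [hQ]; exact List.mem_append_left _ he
          have heT : e ∈ xs.take (k + 2) := (bpass_perm (xs.take (k + 2))).mem_iff.mp heQ
          have := bpass_last_ge (xs.take (k + 2)) e heT
          rw [← hQdef, ← hmxdef] at this
          simp
          omega
      have hinvQ : invAux Q = invAux Q' := by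
        rw [hQ, invAux_append_singleton, hcnt]; ring
      have hbi := bpass_inv (xs.take (k + 2))
      rw [← hQdef, ← hCdef] at hbi
      rw [Prod.mk.injEq]
      constructor
      · simp
      · rw [show (k + 1 + 1) = k + 2 from rfl]
        linarith [hbi, hinvQ]
    · rw [show (k + 1 + 1) = k + 2 from rfl]
      refine ((hwp.append_right [mxQ]).trans ?_)
      rw [← hQ]
      exact bpass_perm _

theorem bubble_count_eq_invAux (x : List Int) : bubble_count x = invAux x := by
  unfold bubble_count
  rw [PySem.List.len_eq]
  cases hx : x with
  | nil =>
    rw [show ((([] : List Int).length : Int) - 1) = -1 by simp, PySem.List.pyRange_neg_one_eq_nil (by omega)]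
    rfl
  | cons x0 xs' =>
    have hlen : x.length = xs'.length + 1 := by rw [hx]; rfl
    rw [← hx]
    rw [show ((x.length : Int) - 1) = ((xs'.length : Nat) : Int) by rw [hlen]; push_cast; ring]
    obtain ⟨w, hw, -⟩ := bubble_outer xs'.length x 0 (by omega)
    rw [hw]
    rw [show xs'.length + 1 = x.length from hlen.symm, List.take_length]
    ring

-- ---- sorted-window lemmas ----
theorem index?_sorted {v : List Int} {a : Int} (hs : v.Pairwise (· ≤ ·)) (ha : a ∈ v) :
    PySem.List.index? v a = some (v.countP (fun e => decide (e < a))) := by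
  induction v with
  | nil => simp at ha
  | cons b t ih =>
    rcases List.pairwise_cons.mp hs with ⟨hb, ht⟩
    by_cases hba : b = a
    · subst hba
      rw [PySem.List.index?_cons_self]
      have : t.countP (fun e => decide (e < b)) = 0 :=
        List.countP_eq_zero.mpr (fun e he => by simpa using not_lt.mpr (hb e he))
      simp [List.countP_cons, this]
    · have hat : a ∈ t := by
        rcases List.mem_cons.mp ha with rfl | h
        · exact absurd rfl hba
        · exact h
      rw [PySem.List.index?_cons_of_ne _ hba, ih ht hat]
      have hba' : b < a := lt_of_le_of_ne (hb a hat) hba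
      simp [List.countP_cons, hba', Nat.add_comm]

theorem eraseIdx_mid (pre suf : List Int) (a : Int) :
    (pre ++ a :: suf).eraseIdx pre.length = pre ++ suf := by
  induction pre with
  | nil => rfl
  | cons c p ih => simp [List.eraseIdx, ih]

theorem eraseIdx_index? {v : List Int} {a : Int} {k : Nat}
    (h : PySem.List.index? v a = some k) : v.eraseIdx k = v.erase a := by
  rcases (PySem.List.index?_eq_some_iff v a k).mp h with ⟨pre, suf, rfl, rfl, hnp⟩
  rw [List.erase_append_right _ (by simpa using hnp), List.erase_cons_head]
  exact eraseIdx_mid pre suf a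

-- proof-side model of the bubble-back while loop: insert after all elements ≤ z
def insertR (z : Int) : List Int → List Int
  | [] => [z]
  | b :: t => if z < b then z :: b :: t else b :: insertR z t

theorem insertR_perm (z : Int) (u : List Int) : (insertR z u).Perm (u ++ [z]) := by
  induction u with
  | nil => simp [insertR]
  | cons b t ih =>
    simp only [insertR]
    split_ifs with h
    · exact (List.perm_append_singleton z (b :: t)).symm
    · simpa using ih.cons b

theorem mem_insertR {e z : Int} {u : List Int} : e ∈ insertR z u ↔ e = z ∨ e ∈ u := by
  induction u with
  | nil => simp [insertR]
  | cons b t ih => simp only [insertR]; split_ifs <;> simp [ih] <;> tauto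

theorem insertR_sorted {z : Int} {u : List Int} (hs : u.Pairwise (· ≤ ·)) :
    (insertR z u).Pairwise (· ≤ ·) := by
  induction u with
  | nil => simp [insertR]
  | cons b t ih =>
    rcases List.pairwise_cons.mp hs with ⟨hb, ht⟩
    simp only [insertR]
    split_ifs with h
    · refine List.pairwise_cons.mpr ⟨?_, hs⟩
      intro e he
      rcases List.mem_cons.mp he with rfl | he
      · exact le_of_lt h
      · exact le_of_lt (lt_of_lt_of_le h (hb e he))
    · refine List.pairwise_cons.mpr ⟨?_, ih ht⟩
      intro e he
      rcases mem_insertR.mp he with rfl | he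
      · omega
      · exact hb e he

theorem insertR_append_lt {z b : Int} (u : List Int) (h : z < b) :
    insertR z (u ++ [b]) = insertR z u ++ [b] := by
  induction u with
  | nil => simp [insertR, h]
  | cons c t ih => simp only [List.cons_append, insertR]; split_ifs <;> simp [ih]

theorem insertR_of_forall_le {z : Int} {u : List Int} (h : ∀ e ∈ u, ¬ z < e) :
    insertR z u = u ++ [z] := by
  induction u with
  | nil => rfl
  | cons b t ih =>
    simp only [insertR, if_neg (h b (by simp))]
    simp [ih (fun e he => h e (by simp [he]))]

theorem bubbleWhile_spec (u : List Int) (z s : Int) (rest : List Int)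
    (hs : u.Pairwise (· ≤ ·)) :
    bubbleWhile (u ++ z :: rest) s u.length = (insertR z u ++ rest, s + cntGT z u) := by
  induction u using List.reverseRecOn generalizing s rest with
  | nil => simp [bubbleWhile, insertR, cntGT]
  | append_singleton u' b ih =>
    rcases List.pairwise_append.mp hs with ⟨hu', _, hub⟩
    have hlen : (u' ++ [b]).length = u'.length + 1 := by simp
    rw [hlen]
    have hv : (u' ++ [b]) ++ z :: rest = u' ++ b :: z :: rest := by simp
    rw [hv]
    show bubbleWhile (u' ++ b :: z :: rest) s (u'.length + 1) = _
    rw [bubbleWhile]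
    have g1 : PySem.List.pyGetD (u' ++ b :: z :: rest) ((u'.length : Int) + 1) 0 = z := by
      rw [show ((u'.length : Int) + 1) = ((u'.length + 1 : Nat) : Int) by push_cast; ring,
        PySem.List.pyGetD_natCast, getD_mid2]
    have g0 : PySem.List.pyGetD (u' ++ b :: z :: rest) ((u'.length : Int)) 0 = b := by
      rw [PySem.List.pyGetD_natCast, getD_mid]
    rw [g1, g0]
    by_cases hz : z < b
    · rw [if_pos hz]
      have s1 : PySem.List.pySetD (u' ++ b :: z :: rest) ((u'.length : Int) + 1) b =
          u' ++ b :: b :: rest := by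
        rw [show ((u'.length : Int) + 1) = ((u'.length + 1 : Nat) : Int) by push_cast; ring,
          PySem.List.pySetD_natCast, set_mid2]
      have s2 : PySem.List.pySetD (u' ++ b :: b :: rest) ((u'.length : Int)) z =
          u' ++ z :: b :: rest := by
        rw [PySem.List.pySetD_natCast, set_mid]
      rw [s1, s2, ih (s + 1) (b :: rest) hu']
      rw [insertR_append_lt _ hz, Prod.mk.injEq]
      constructor
      · simp
      · simp [cntGT, List.countP_append, hz]
        push_cast; ring
    · rw [if_neg hz]
      rw [insertR_of_forall_le (by
        intro e he
        rcases List.mem_append.mp he with he | he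
        · have := hub e he b (by simp); omega
        · simp at he; omega)]
      rw [Prod.mk.injEq]
      refine ⟨by simp, ?_⟩
      have : cntGT z (u' ++ [b]) = 0 := by
          simp only [cntGT]
          rw [List.countP_eq_zero.mpr]
          · rfl
          · intro e he
            rcases List.mem_append.mp he with he | he
            · have := hub e he b (by simp); simp; omega
            · simp at he; simp; omega
      rw [this]; ring

-- window k of length M
def winW (x : List Int) (M k : Nat) : List Int := (x.drop k).take M

theorem ccf_loop (x : List Int) (M : Nat) (hM : 1 ≤ M) (c : Nat)
    (hc : M + c ≤ x.length) :
    ∃ v, (PySem.List.pyRange ((M : Int)) ((M : Int) + (c : Int)) 1).foldl (ccfStep x (M : Int))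
        ([invAux (winW x M 0)], PySem.List.sorted (winW x M 0) (fun e => e) false) =
        ((List.range (c + 1)).map (fun k => invAux (winW x M k)), v) ∧
      v.Pairwise (· ≤ ·) ∧ v.Perm (winW x M c) := by
  induction c with
  | zero =>
    refine ⟨PySem.List.sorted (winW x M 0) (fun e => e) false, ?_, ?_, ?_⟩
    · rw [show ((M : Int) + ((0 : Nat) : Int)) = (M : Int) by simp,
        PySem.List.pyRange_one_eq_nil (le_refl _)]
      rfl
    · exact PySem.List.sorted_pairwise (winW x M 0) (fun e => e)
    · exact PySem.List.sorted_perm (winW x M 0) (fun e => e) false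
  | succ c ih =>
    obtain ⟨v, hfold, hvs, hvp⟩ := ih (by omega)
    have hcn : c < x.length := by omega
    have hMc : M + c < x.length := by omega
    -- window decomposition
    set a := x[c]'hcn with hadef
    set t := (x.drop (c + 1)).take (M - 1) with htdef
    have hWc : winW x M c = a :: t := by
      rw [winW, List.drop_eq_getElem_cons hcn, show M = (M - 1) + 1 by omega,
        List.take_succ_cons, htdef]
    have htlen : t.length = M - 1 := by
      rw [htdef, List.length_take, List.length_drop]; omega
    have hMd : M - 1 < (x.drop (c + 1)).length := by
      rw [List.length_drop]; omega
    have hWc1 : winW x M (c + 1) = t ++ [x[M + c]'hMc] := by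
      have h1 : winW x M (c + 1) =
          List.take (M - 1) (x.drop (c + 1)) ++ (x.drop (c + 1))[M - 1]?.toList := by
        rw [winW]
        conv_lhs => rw [show M = M - 1 + 1 by omega, List.take_succ]
      rw [h1, List.getElem?_eq_getElem hMd, htdef]
      simp only [List.getElem_drop, Option.toList_some]
      rw [getElem_congr rfl (show c + 1 + (M - 1) = M + c by omega) (by omega)]
    -- unroll one loop iteration
    have hr : PySem.List.pyRange ((M : Int)) ((M : Int) + ((c + 1 : Nat) : Int)) 1 =
        PySem.List.pyRange ((M : Int)) ((M : Int) + ((c : Nat) : Int)) 1 ++ [(M : Int) + ((c : Nat) : Int)] := by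
      rw [show ((M : Int) + ((c + 1 : Nat) : Int)) = ((M : Int) + ((c : Nat) : Int)) + 1 by push_cast; ring]
      exact PySem.List.pyRange_one_succ_right (by omega)
    rw [hr, List.foldl_append, hfold, List.foldl_cons, List.foldl_nil]
    rw [hWc] at hvp
    -- evaluate the step
    have ha_mem : a ∈ v := hvp.mem_iff.mpr (by simp)
    have hidx : PySem.List.index? v a = some (v.countP (fun e => decide (e < a))) :=
      index?_sorted hvs ha_mem
    have hcntv : v.countP (fun e => decide (e < a)) = t.countP (fun e => decide (e < a)) := by
      rw [hvp.countP_eq, List.countP_cons]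
      simp
    have hsteps0 : PySem.List.pyGetD ((List.range (c + 1)).map (fun k => invAux (winW x M k)))
        ((M : Int) + ((c : Nat) : Int) - (M : Int)) 0 = invAux (winW x M c) := by
      rw [show ((M : Int) + ((c : Nat) : Int) - (M : Int)) = ((c : Nat) : Int) by ring,
        PySem.List.pyGetD_natCast, PySem.List.getD_map_range _ _ _ _ (by omega)]
    have hxv : PySem.List.pyGetD x ((M : Int) + ((c : Nat) : Int) - (M : Int)) 0 = a := by
      rw [show ((M : Int) + ((c : Nat) : Int) - (M : Int)) = ((c : Nat) : Int) by ring,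
        PySem.List.pyGetD_natCast, List.getD_eq_getElem x 0 hcn, hadef]
    have hz : PySem.List.pyGetD x ((M : Int) + ((c : Nat) : Int)) 0 = x[M + c]'hMc := by
      rw [show ((M : Int) + ((c : Nat) : Int)) = ((M + c : Nat) : Int) by push_cast; ring,
        PySem.List.pyGetD_natCast, List.getD_eq_getElem x 0 hMc]
    have hv1p : (v.erase a).Perm t := by
      have h1 : (v.erase a).Perm ((a :: t).erase a) := hvp.erase a
      rwa [List.erase_cons_head] at h1
    have hv1s : (v.erase a).Pairwise (· ≤ ·) := List.Pairwise.sublist List.erase_sublist hvs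
    have hv1len : (v.erase a).length = M - 1 := by
      rw [hv1p.length_eq, htlen]
    have htoNat : (((M : Nat) : Int) - 1).toNat = M - 1 := by omega
    have hbw := bubbleWhile_spec (v.erase a) (x[M + c]'hMc) (invAux t) [] hv1s
    rw [List.append_nil] at hbw
    have hcntz : cntGT (x[M + c]'hMc) (v.erase a) = cntGT (x[M + c]'hMc) t := by
      unfold cntGT
      rw [hv1p.countP_eq]
    -- the step equation
    have hSdef : ∀ S : Int, bubbleWhile ((v.erase a) ++ [x[M + c]'hMc]) S (v.erase a).length =
        (insertR (x[M + c]'hMc) (v.erase a), S + cntGT (x[M + c]'hMc) (v.erase a)) := by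
      intro S
      have h := bubbleWhile_spec (v.erase a) (x[M + c]'hMc) S [] hv1s
      rwa [List.append_nil] at h
    have hval : invAux (winW x M c) -
        ((v.countP (fun e => decide (e < a)) : Nat) : Int) + cntGT (x[M + c]'hMc) (v.erase a) =
        invAux (winW x M (c + 1)) := by
      have e1 : invAux (winW x M c) = cntLT a t + invAux t := by
        rw [hWc, invAux_cons]
      have e2 : ((v.countP (fun e => decide (e < a)) : Nat) : Int) = cntLT a t := by
        rw [hcntv]; rfl
      have e3 : invAux (winW x M (c + 1)) = invAux t + cntGT (x[M + c]'hMc) t := by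
        rw [hWc1, invAux_append_singleton]
      rw [hcntz]
      linarith [e1, e2, e3]
    have hstep : ccfStep x ((M : Int)) ((List.range (c + 1)).map (fun k => invAux (winW x M k)), v)
        ((M : Int) + ((c : Nat) : Int)) =
        ((List.range (c + 1)).map (fun k => invAux (winW x M k)) ++ [invAux (winW x M (c + 1))],
          insertR (x[M + c]'hMc) (v.erase a)) := by
      simp only [ccfStep]
      rw [hsteps0, hxv, hidx]
      simp only [Option.getD_some]
      rw [eraseIdx_index? hidx, hz, htoNat, ← hv1len, hSdef, hval]
    rw [hstep]
    refine ⟨insertR (x[M + c]'hMc) (v.erase a), ?_, insertR_sorted hv1s, ?_⟩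
    · rw [Prod.mk.injEq]
      refine ⟨?_, rfl⟩
      simp [List.range_succ]
    · rw [hWc1]
      exact (insertR_perm _ _).trans (hv1p.append_right _)

-- ===== VERDICT (by name: the statement is the Claim_ definition above) =====
theorem complexity_count_fast_spec : Claim_equal_complexity_count_fast := by
  unfold Claim_equal_complexity_count_fast
  intro x m hdom hpre
  unfold Spec_complexity_count_fast
  rcases hpre with hm | ⟨hxe, hme⟩
  case inr =>
    subst hxe; subst hme
    decide
  case inl =>
  unfold complexity_count_fast complexity_count_fast_alt
  rw [PySem.List.len_eq]
  by_cases hlt : ((x.length : Nat) : Int) < m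
  · rw [if_pos hlt, if_pos hlt]
  · rw [if_neg hlt, if_neg hlt]
    have hMeq : m = ((m.toNat : Nat) : Int) := by omega
    set M := m.toNat with hMdef
    have hM1 : 1 ≤ M := by omega
    have hMn : M ≤ x.length := by omega
    rw [hMeq]
    have hsl : PySem.List.slice x none (some ((M : Nat) : Int)) = winW x M 0 := by
      rw [show PySem.List.slice x none (some ((M : Nat) : Int)) =
          List.take (((M : Nat) : Int)).toNat x from PySem.List.slice_to x (by omega)]
      rw [winW, List.drop_zero, Int.toNat_natCast]
    obtain ⟨v, hfold, -, -⟩ := ccf_loop x M hM1 (x.length - M) (by omega)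
    have hrange_eq : PySem.List.pyRange ((M : Nat) : Int) ((x.length : Nat) : Int) 1 =
        PySem.List.pyRange ((M : Int)) ((M : Int) + (((x.length - M : Nat)) : Int)) 1 := by
      congr 1
      push_cast
      omega
    rw [hsl, bubble_count_eq_invAux, hrange_eq, hfold]
    show (List.range (x.length - M + 1)).map (fun k => invAux (winW x M k)) = _
    rw [PySem.List.foldl_append_singleton_eq_map, List.nil_append]
    rw [PySem.List.pyRange_one, List.map_map]
    have hcnt : (((x.length : Nat) : Int) - ((M : Nat) : Int) + 1 - 0).toNat = x.length - M + 1 := by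
      omega
    rw [hcnt]
    apply List.map_congr_left
    intro k hk
    show invAux (winW x M k) =
      invLoop (PySem.List.slice x (some (0 + (k : Int))) (some (0 + (k : Int) + ((M : Nat) : Int)))) 0
    have hslk : PySem.List.slice x (some (0 + (k : Int))) (some (0 + (k : Int) + ((M : Nat) : Int))) =
        winW x M k := by
      rw [show (0 + (k : Int)) = ((k : Nat) : Int) by ring]
      rw [PySem.List.slice_natCast_add]
      rfl
    rw [hslk, invLoop_eq]
    ring
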